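-- pv_equiv track=rewrite | github.com/arknave/project-euler | python/pe788.py | build_choose
-- ===== SOURCE A (Python) =====
-- MOD = int(1e9 + 7)
--
-- def build_choose(n):
--     res = [[1]]
--     for _ in range(n):
--         row = [1]
--         for a, b in zip(res[-1], res[-1][1:]):
--             c = a + b
--             if c >= MOD:
--                 c -= MOD
--             row.append(c)
--         row.append(1)
--         res.append(row)
--
--     return res
-- ===== SOURCE B (Python) =====
-- MOD = int(1e9 + 7)
--
-- def build_choose(n):
--     # Column-by-column via the Pascal/hockey-stick prefix-sum recurrence.
--     m = max(n, 0) + 1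
--     cols = [[1] * m]
--     for _ in range(m - 1):
--         prev = cols[-1]
--         s = 0
--         col = []
--         for v in prev[:-1]:
--             s += v
--             if s >= MOD:
--                 s -= MOD
--             col.append(s)
--         cols.append(col)
--     return [[cols[k][i - k] for k in range(i + 1)] for i in range(m)]
-- ===== Notes on version B (the rewrite author's own statement) =====
-- stated objective: alternative
-- what changed: B builds the triangle column-by-column (each new column is a running modular prefix sum of the previous column, the hockey-stick/Pascal recurrence) and then assembles the rows, instead of A's row-by-row adjacent-pair sums.
import Mathlib
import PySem

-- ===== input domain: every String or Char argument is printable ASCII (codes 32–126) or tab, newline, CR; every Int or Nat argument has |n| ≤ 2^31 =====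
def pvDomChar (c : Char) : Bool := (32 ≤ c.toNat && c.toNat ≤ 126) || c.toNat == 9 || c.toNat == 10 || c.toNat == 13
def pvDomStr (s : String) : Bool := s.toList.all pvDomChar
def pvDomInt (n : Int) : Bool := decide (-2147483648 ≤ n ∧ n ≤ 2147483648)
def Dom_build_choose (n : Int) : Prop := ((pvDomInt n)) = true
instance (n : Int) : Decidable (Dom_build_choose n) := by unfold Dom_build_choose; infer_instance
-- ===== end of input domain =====

-- B builds the triangle column-by-column via the modular prefix-sum (Pascal) recurrence instead of A's row-by-row adjacent sums; proved to return the same rows.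


-- ===== PORT A =====
def pvMOD : Int := 1000000007

-- the inner loop of A: row = [1]; for a,b in zip(prev, prev[1:]): …; row.append(1)
def pvRowStep (prev : List Int) : List Int :=
  (1 :: List.zipWith (fun a b =>
      let c := a + b
      if c ≥ pvMOD then c - pvMOD else c) prev (PySem.List.slice prev (some 1) none)) ++ [1]

def build_choose (n : Int) : List (List Int) :=
  (PySem.List.pyRange 0 n 1).foldl
    (fun res _ => res ++ [pvRowStep (PySem.List.pyGetD res (-1) [])]) [[1]]

-- ===== PORT B =====
-- the inner loop of B: s = 0; col = []; for v in prev[:-1]: …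
def pvColStep (prev : List Int) : List Int :=
  ((PySem.List.slice prev none (some (-1))).foldl
      (fun (st : Int × List Int) v =>
        let s := st.1 + v
        let s := if s ≥ pvMOD then s - pvMOD else s
        (s, st.2 ++ [s])) (0, ([] : List Int))).2

def build_choose_alt (n : Int) : List (List Int) :=
  let m : Nat := (max n 0).toNat + 1
  let cols := (List.range (m - 1)).foldl
    (fun cols _ => cols ++ [pvColStep (PySem.List.pyGetD cols (-1) [])])
    [List.replicate m (1 : Int)]
  -- cols[k][i-k]: both indices are nonnegative and in range, so pyGetD is exact here
  (List.range m).map (fun (i : Nat) => (List.range (i + 1)).map (fun (k : Nat) =>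
    PySem.List.pyGetD (PySem.List.pyGetD cols (k : Int) []) ((i : Int) - (k : Int)) 0))

-- ===== PRECONDITION & SPEC =====
def Spec_build_choose (n : Int) (out : List (List Int)) : Prop := out = build_choose_alt n
instance (n : Int) (out : List (List Int)) : Decidable (Spec_build_choose n out) := by unfold Spec_build_choose; infer_instance

-- ===== CLAIM (what is proved, stated in full; the proofs are below) =====
def Claim_equal_build_choose : Prop := ∀ (n : Int), Dom_build_choose n → Spec_build_choose n (build_choose n)

-- ===== LEMMAS AND PROOFS =====

-- the mathematical triangle: binomial coefficients mod 1e9+7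
def binM (i k : Nat) : Int := ((Nat.choose i k % 1000000007 : Nat) : Int)
def rowT (i : Nat) : List Int := (List.range (i + 1)).map (binM i)
def triT (m : Nat) : List (List Int) := (List.range m).map rowT
def colT (k L : Nat) : List Int := (List.range L).map (fun j => binM (k + j) k)

lemma fmod (x y : Nat) :
    (if ((x % 1000000007 : Nat) : Int) + ((y % 1000000007 : Nat) : Int) ≥ pvMOD
      then ((x % 1000000007 : Nat) : Int) + ((y % 1000000007 : Nat) : Int) - pvMOD
      else ((x % 1000000007 : Nat) : Int) + ((y % 1000000007 : Nat) : Int))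
    = (((x + y) % 1000000007 : Nat) : Int) := by
  simp only [pvMOD]
  push_cast
  omega

lemma binM_pascal (i k : Nat) :
    (if binM i k + binM i (k + 1) ≥ pvMOD
      then binM i k + binM i (k + 1) - pvMOD
      else binM i k + binM i (k + 1)) = binM (i + 1) (k + 1) := by
  simpa [binM, Nat.choose_succ_succ] using fmod (Nat.choose i k) (Nat.choose i (k + 1))

lemma binM_zero (i : Nat) : binM i 0 = 1 := by simp [binM]
lemma binM_self (i : Nat) : binM i i = 1 := by simp [binM]

lemma zipWith_map_range (f : Int → Int → Int) (g h : Nat → Int) (i : Nat) :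
    List.zipWith f ((List.range (i + 1)).map g) ((List.range i).map h)
      = (List.range i).map (fun k => f (g k) (h k)) := by
  conv_lhs => rw [List.range_succ, List.map_append,
    show ((List.range i).map h) = (List.range i).map h ++ ([] : List Int) from by simp]
  rw [List.zipWith_append (by simp)]
  simp

lemma foldl_const {α β : Type} (g : α → α) (l : List β) (init : α) :
    l.foldl (fun r _ => g r) init = g^[l.length] init := by
  induction l generalizing init with
  | nil => rfl
  | cons x xs ih => simp [List.foldl_cons, ih, Function.iterate_succ_apply]

lemma rowT_tail (i : Nat) :
    (rowT i).tail = (List.range i).map (fun k => binM i (k + 1)) := by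
  unfold rowT
  rw [List.range_succ_eq_map]
  simp [List.map_map, Function.comp_def]

lemma rowT_succ (i : Nat) :
    rowT (i + 1) = (1 :: (List.range i).map (fun k => binM (i + 1) (k + 1))) ++ [1] := by
  unfold rowT
  rw [List.range_succ_eq_map, List.range_succ]
  simp [List.map_map, Function.comp_def, binM_zero, binM_self]

-- A's row step turns row i into row i+1
lemma rowStep_rowT (i : Nat) : pvRowStep (rowT i) = rowT (i + 1) := by
  unfold pvRowStep
  rw [PySem.List.slice_from_one, rowT_tail,
    show rowT i = (List.range (i + 1)).map (binM i) from rfl,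
    zipWith_map_range]
  rw [rowT_succ]
  congr 1
  congr 1
  refine List.map_congr_left fun k _ => ?_
  simpa using binM_pascal i k

def pvStepA (res : List (List Int)) : List (List Int) :=
  res ++ [pvRowStep (PySem.List.pyGetD res (-1) [])]

lemma triT_succ (m : Nat) : triT (m + 1) = triT m ++ [rowT m] := by
  simp [triT, List.range_succ]

lemma stepA_triT (m : Nat) : pvStepA (triT (m + 1)) = triT (m + 2) := by
  rw [triT_succ m, pvStepA, PySem.List.pyGetD_neg_one_append_singleton, rowStep_rowT,
    ← triT_succ m, ← triT_succ (m + 1)]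

lemma iterA (c : Nat) : pvStepA^[c] (triT 1) = triT (1 + c) := by
  induction c with
  | zero => rfl
  | succ c ih =>
      rw [Function.iterate_succ_apply', ih, show 1 + c = c + 1 from by omega, stepA_triT,
        show 1 + (c + 1) = c + 2 from by omega]

lemma build_choose_eq_triT (n : Int) : build_choose n = triT (n.toNat + 1) := by
  unfold build_choose
  have hfc := foldl_const pvStepA (PySem.List.pyRange 0 n 1) [[1]]
  simp only [pvStepA] at hfc
  rw [show ([[1]] : List (List Int)) = triT 1 from by simp [triT, rowT, binM]] at hfc ⊢
  rw [hfc, PySem.List.length_pyRange_one, iterA,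
    show 1 + (n - 0).toNat = n.toNat + 1 from by omega]

-- B side: the prefix-sum loop computes the next column
lemma colStep_fold (k L : Nat) :
    (((List.range L).map (fun j => binM (k + j) k)).foldl
        (fun (st : Int × List Int) v =>
          let s := st.1 + v
          let s := if s ≥ pvMOD then s - pvMOD else s
          (s, st.2 ++ [s])) (0, ([] : List Int)))
      = (((Nat.choose (k + L) (k + 1) % 1000000007 : Nat) : Int),
          (List.range L).map (fun j => binM (k + 1 + j) (k + 1))) := by
  induction L with
  | zero => simp
  | succ L ih =>
      rw [List.range_succ, List.map_append, List.foldl_append, ih]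
      simp only [List.map_cons, List.map_nil, List.foldl_cons, List.foldl_nil]
      have hs : (if ((Nat.choose (k + L) (k + 1) % 1000000007 : Nat) : Int) + binM (k + L) k ≥ pvMOD
          then ((Nat.choose (k + L) (k + 1) % 1000000007 : Nat) : Int) + binM (k + L) k - pvMOD
          else ((Nat.choose (k + L) (k + 1) % 1000000007 : Nat) : Int) + binM (k + L) k)
          = ((Nat.choose (k + L + 1) (k + 1) % 1000000007 : Nat) : Int) := by
        have := fmod (Nat.choose (k + L) (k + 1)) (Nat.choose (k + L) k)
        simpa [binM, Nat.choose_succ_succ, Nat.add_comm] using this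
      simp only [binM] at hs ⊢
      rw [hs]
      have e1 : k + (L + 1) = k + L + 1 := by omega
      have e2 : k + 1 + L = k + L + 1 := by omega
      simp [e1, e2]

lemma colStep_colT (k L : Nat) : pvColStep (colT k (L + 1)) = colT (k + 1) L := by
  unfold pvColStep colT
  rw [PySem.List.slice_to_neg_one]
  rw [show ((List.range (L + 1)).map (fun j => binM (k + j) k)).dropLast
      = (List.range L).map (fun j => binM (k + j) k) from by rw [List.range_succ, List.map_append]; simp]
  rw [colStep_fold]

def pvStepB (cols : List (List Int)) : List (List Int) :=
  cols ++ [pvColStep (PySem.List.pyGetD cols (-1) [])]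

lemma iterB (m t : Nat) (ht : t + 1 ≤ m) :
    pvStepB^[t] [colT 0 m] = (List.range (t + 1)).map (fun k => colT k (m - k)) := by
  induction t with
  | zero => simp
  | succ t ih =>
      have h1 : t + 1 ≤ m := by omega
      have hc : pvColStep (colT t (m - t)) = colT (t + 1) (m - (t + 1)) := by
        rw [show m - t = (m - (t + 1)) + 1 from by omega, colStep_colT]
      rw [Function.iterate_succ_apply', ih h1, pvStepB]
      rw [show (List.range (t + 1)).map (fun k => colT k (m - k))
          = (List.range t).map (fun k => colT k (m - k)) ++ [colT t (m - t)] from by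
        rw [List.range_succ]; simp]
      rw [PySem.List.pyGetD_neg_one_append_singleton, hc]
      rw [show (List.range (t + 1 + 1)).map (fun k => colT k (m - k))
          = ((List.range t).map (fun k => colT k (m - k)) ++ [colT t (m - t)]) ++ [colT (t + 1) (m - (t + 1))] from by
        rw [List.range_succ (n := t + 1), List.range_succ (n := t)]; simp]

lemma replicate_eq_colT (m : Nat) : List.replicate m (1 : Int) = colT 0 m := by
  unfold colT
  symm
  rw [List.eq_replicate_iff]
  refine ⟨by simp, ?_⟩
  intro b hb
  simp only [List.mem_map] at hb
  obtain ⟨j, -, hj⟩ := hb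
  simp [← hj, binM]

lemma getD_colT (k L j : Nat) (hj : j < L) : (colT k L).getD j 0 = binM (k + j) k := by
  unfold colT
  rw [List.getD_eq_getElem?_getD]
  simp [List.getElem?_map, List.getElem?_range hj]

lemma build_choose_alt_eq_triT (n : Int) : build_choose_alt n = triT (n.toNat + 1) := by
  have hm : (max n 0).toNat + 1 = n.toNat + 1 := by omega
  have hcols : (List.range (n.toNat + 1 - 1)).foldl
      (fun cols _ => cols ++ [pvColStep (PySem.List.pyGetD cols (-1) [])])
      [List.replicate (n.toNat + 1) (1 : Int)]
      = (List.range (n.toNat + 1)).map (fun k => colT k (n.toNat + 1 - k)) := by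
    have hfc := foldl_const pvStepB (List.range (n.toNat + 1 - 1)) [List.replicate (n.toNat + 1) (1 : Int)]
    simp only [pvStepB] at hfc
    rw [hfc, List.length_range, replicate_eq_colT, iterB (n.toNat + 1) (n.toNat + 1 - 1) (by omega)]
    simp
  unfold build_choose_alt
  simp only [hm, hcols]
  unfold triT
  refine List.map_congr_left fun i hi => ?_
  rw [List.mem_range] at hi
  unfold rowT
  refine List.map_congr_left fun k hk => ?_
  rw [List.mem_range] at hk
  have h3 : PySem.List.pyGetD ((List.range (n.toNat + 1)).map (fun k => colT k (n.toNat + 1 - k))) (k : Int) []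
      = colT k (n.toNat + 1 - k) := by
    rw [PySem.List.pyGetD_natCast, List.getD_eq_getElem?_getD]
    simp [List.getElem?_map, List.getElem?_range (show k < n.toNat + 1 from by omega)]
  rw [h3, show ((i : Int) - (k : Int)) = ((i - k : Nat) : Int) from by omega,
    PySem.List.pyGetD_natCast, getD_colT k (n.toNat + 1 - k) (i - k) (by omega)]
  congr 1
  omega

-- ===== VERDICT (by name: the statement is the Claim_ definition above) =====
theorem build_choose_spec : Claim_equal_build_choose := by
  intro n _
  unfold Spec_build_choose
  rw [build_choose_eq_triT, build_choose_alt_eq_triT]
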